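-- pv_equiv track=rewrite | github.com/aiser-platform/aiser-world | packages/chat2chart/server/app/modules/ai/services/query_optimizer.py | _estimate_improvement
-- ===== SOURCE A (Python) =====
-- from typing import Any, Dict, List, Optional, Tuple
--
-- def _estimate_improvement(optimizations: List[str]) -> str:
--     """Estimate performance improvement from optimizations."""
--     if not optimizations:
--         return "none"
--
--     # Categorize optimizations by impact
--     high_impact = [
--         "warehouse_aggregation_optimized",
--         "clickhouse_partition_pruning_applicable",
--         "cube_pre_aggregation_available"
--     ]
--
--     medium_impact = [
--         "postgresql_join_optimization_applicable",
--         "consider_cte_for_complexity",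
--         "mysql_index_hints_available"
--     ]
--
--     if any(op in optimizations for op in high_impact):
--         return "high"
--     elif any(op in optimizations for op in medium_impact):
--         return "medium"
--     else:
--         return "low"
-- ===== SOURCE B (Python) =====
-- def _estimate_improvement(optimizations):
--     """Estimate performance improvement from optimizations."""
--     if not optimizations:
--         return "none"
--
--     rank = {
--         "warehouse_aggregation_optimized": 2,
--         "clickhouse_partition_pruning_applicable": 2,
--         "cube_pre_aggregation_available": 2,
--         "postgresql_join_optimization_applicable": 1,
--         "consider_cte_for_complexity": 1,
--         "mysql_index_hints_available": 1,
--     }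
--
--     best = 0
--     for op in optimizations:
--         r = rank.get(op, 0)
--         if r > best:
--             best = r
--
--     return {2: "high", 1: "medium"}.get(best, "low")
-- ===== Notes on version B (the rewrite author's own statement) =====
-- stated objective: idiomatic
-- what changed: Replaces the two any()-scans over fixed name lists (each doing a membership scan of the input) with a single pass over the input keeping the maximum rank from a name->priority dict.
import Mathlib
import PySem

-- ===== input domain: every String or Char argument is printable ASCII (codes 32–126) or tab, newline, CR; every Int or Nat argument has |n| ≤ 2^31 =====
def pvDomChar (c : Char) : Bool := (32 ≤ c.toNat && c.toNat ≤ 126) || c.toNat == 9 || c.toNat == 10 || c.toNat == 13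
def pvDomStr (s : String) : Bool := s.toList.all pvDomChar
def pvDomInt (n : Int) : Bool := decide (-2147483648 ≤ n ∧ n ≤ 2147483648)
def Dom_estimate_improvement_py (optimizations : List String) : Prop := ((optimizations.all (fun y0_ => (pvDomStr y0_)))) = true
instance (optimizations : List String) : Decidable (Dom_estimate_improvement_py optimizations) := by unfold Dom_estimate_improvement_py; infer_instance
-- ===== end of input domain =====

-- B replaces A's two any()-scans over fixed name lists with one pass over the input
-- keeping the maximum rank from a name→priority table (idiomatic; same behaviour).

-- ===== PORT A =====
def estimate_improvement_py (optimizations : List String) : String :=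
  if optimizations = [] then "none"
  else
    let high_impact : List String :=
      ["warehouse_aggregation_optimized",
       "clickhouse_partition_pruning_applicable",
       "cube_pre_aggregation_available"]
    let medium_impact : List String :=
      ["postgresql_join_optimization_applicable",
       "consider_cte_for_complexity",
       "mysql_index_hints_available"]
    if high_impact.any (fun op => optimizations.contains op) then "high"
    else if medium_impact.any (fun op => optimizations.contains op) then "medium"
    else "low"

-- ===== PORT B =====
-- the name → priority dict of Source B
def pvRankDict : PySem.Dict String Int :=
  PySem.Dict.ofList
    [("warehouse_aggregation_optimized", 2),
     ("clickhouse_partition_pruning_applicable", 2),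
     ("cube_pre_aggregation_available", 2),
     ("postgresql_join_optimization_applicable", 1),
     ("consider_cte_for_complexity", 1),
     ("mysql_index_hints_available", 1)]

def estimate_improvement_py_alt (optimizations : List String) : String :=
  if optimizations = [] then "none"
  else
    let best : Int :=
      optimizations.foldl
        (fun best op =>
          let r := pvRankDict.getD op 0
          if r > best then r else best) 0
    -- {2: "high", 1: "medium"}.get(best, "low")
    if best = 2 then "high" else if best = 1 then "medium" else "low"

-- ===== PRECONDITION & SPEC =====
def Spec_estimate_improvement_py (optimizations : List String) (out : String) : Prop := out = estimate_improvement_py_alt optimizations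
instance (optimizations : List String) (out : String) : Decidable (Spec_estimate_improvement_py optimizations out) := by unfold Spec_estimate_improvement_py; infer_instance

-- ===== CLAIM (what is proved, stated in full; the proofs are below) =====
def Claim_equal_estimate_improvement_py : Prop := ∀ (optimizations : List String), Dom_estimate_improvement_py optimizations → Spec_estimate_improvement_py optimizations (estimate_improvement_py optimizations)

-- ===== LEMMAS AND PROOFS =====

def pvIsHigh (s : String) : Bool :=
  s == "warehouse_aggregation_optimized" ||
  s == "clickhouse_partition_pruning_applicable" ||
  s == "cube_pre_aggregation_available"

def pvIsMed (s : String) : Bool :=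
  s == "postgresql_join_optimization_applicable" ||
  s == "consider_cte_for_complexity" ||
  s == "mysql_index_hints_available"

theorem pvRank_cases (s : String) :
    pvRankDict.getD s 0 = if pvIsHigh s then 2 else if pvIsMed s then 1 else 0 := by
  have hd : pvRankDict = PySem.Dict.mk
      [("warehouse_aggregation_optimized", 2),
       ("clickhouse_partition_pruning_applicable", 2),
       ("cube_pre_aggregation_available", 2),
       ("postgresql_join_optimization_applicable", 1),
       ("consider_cte_for_complexity", 1),
       ("mysql_index_hints_available", 1)] := by decide
  rw [hd]
  simp only [PySem.Dict.getD, PySem.Dict.get?_mk_cons, pvIsHigh, pvIsMed]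
  split_ifs <;> simp_all [beq_iff_eq, PySem.Dict.get?, List.find?] <;> simp_all [eq_comm]

theorem pvRank_nonneg (s : String) : 0 ≤ pvRankDict.getD s 0 := by
  rw [pvRank_cases]; split_ifs <;> norm_num

-- the fold keeps a running maximum, so the accumulator splits off as a max
theorem pvFoldl_max (l : List String) (b : Int) (hb : 0 ≤ b) :
    l.foldl (fun best op =>
      let r := pvRankDict.getD op 0
      if r > best then r else best) b
    = max b (l.foldl (fun best op =>
      let r := pvRankDict.getD op 0
      if r > best then r else best) 0) := by
  induction l generalizing b with
  | nil => simp [max_eq_left hb]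
  | cons x xs ih =>
    have h0 := pvRank_nonneg x
    have hf : ∀ c : Int,
        (if pvRankDict.getD x 0 > c then pvRankDict.getD x 0 else c)
          = max c (pvRankDict.getD x 0) := by
      intro c; rw [max_def]; split_ifs <;> omega
    simp only [List.foldl_cons, hf]
    rw [ih (max b (pvRankDict.getD x 0)) (le_max_of_le_left hb),
        ih (max 0 (pvRankDict.getD x 0)) (le_max_of_le_left le_rfl),
        max_eq_right h0, max_assoc]

theorem pvBest_char (l : List String) :
    l.foldl (fun best op =>
      let r := pvRankDict.getD op 0
      if r > best then r else best) 0
    = if l.any pvIsHigh then 2 else if l.any pvIsMed then 1 else 0 := by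
  induction l with
  | nil => simp
  | cons x xs ih =>
    have h0 := pvRank_nonneg x
    have hf : ∀ c : Int,
        (if pvRankDict.getD x 0 > c then pvRankDict.getD x 0 else c)
          = max c (pvRankDict.getD x 0) := by
      intro c; rw [max_def]; split_ifs <;> omega
    simp only [List.foldl_cons, hf]
    rw [pvFoldl_max xs _ (le_max_of_le_left le_rfl), max_eq_right h0, ih,
        List.any_cons, List.any_cons, pvRank_cases x]
    by_cases hh : pvIsHigh x <;> by_cases hm : pvIsMed x <;>
      by_cases h1 : xs.any pvIsHigh <;> by_cases h2 : xs.any pvIsMed <;>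
        norm_num [hh, hm, h1, h2, max_def]

-- swapping the two any() scans: names.any (contains l) = l.any (contains names)
theorem pvAnySwap (as bs : List String) :
    (as.any fun a => bs.contains a) = bs.any (fun b => as.contains b) := by
  rw [Bool.eq_iff_iff]
  simp only [List.any_eq_true, List.contains_iff_mem]
  tauto

theorem pvContains_high (s : String) :
    ((["warehouse_aggregation_optimized",
       "clickhouse_partition_pruning_applicable",
       "cube_pre_aggregation_available"] : List String).contains s) = pvIsHigh s := by
  rw [Bool.eq_iff_iff]
  simp only [pvIsHigh, List.contains_iff_mem, List.mem_cons, List.not_mem_nil,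
    or_false, Bool.or_eq_true, beq_iff_eq]
  tauto

theorem pvContains_med (s : String) :
    ((["postgresql_join_optimization_applicable",
       "consider_cte_for_complexity",
       "mysql_index_hints_available"] : List String).contains s) = pvIsMed s := by
  rw [Bool.eq_iff_iff]
  simp only [pvIsMed, List.contains_iff_mem, List.mem_cons, List.not_mem_nil,
    or_false, Bool.or_eq_true, beq_iff_eq]
  tauto

-- ===== VERDICT (by name: the statement is the Claim_ definition above) =====
theorem estimate_improvement_py_spec : Claim_equal_estimate_improvement_py := by
  intro l _
  unfold Spec_estimate_improvement_py estimate_improvement_py estimate_improvement_py_alt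
  by_cases hnil : l = []
  · simp [hnil]
  · simp only [hnil, if_false]
    rw [pvAnySwap (["warehouse_aggregation_optimized",
          "clickhouse_partition_pruning_applicable",
          "cube_pre_aggregation_available"] : List String) l,
        pvAnySwap (["postgresql_join_optimization_applicable",
          "consider_cte_for_complexity",
          "mysql_index_hints_available"] : List String) l]
    simp only [pvContains_high, pvContains_med]
    rw [pvBest_char]
    by_cases hh : l.any pvIsHigh <;> by_cases hm : l.any pvIsMed <;>
      simp [hh, hm]
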